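-- pv_equiv track=rewrite | github.com/Feraclin/MyLeetCodeProblemSolved | YandexAlgoss3.0 - 1/F - good str.py | good_str
-- ===== SOURCE A (Python) =====
-- def good_str(lst: list[int]) -> int:
--     if len(lst) < 2:
--         return 0
--     tmp = min(lst)
--
--     lst1 = [i - tmp for i in lst]
--
--     lst_lst = []
--     tmp_lst = []
--     for i in lst1:
--         if i > 0:
--             tmp_lst.append(i)
--         elif i <= 0 < len(tmp_lst):
--             lst_lst.append(tmp_lst)
--             tmp_lst = []
--     if 0 < len(tmp_lst):
--         lst_lst.append(tmp_lst)
--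
--     return min(lst) * (len(lst) - 1) + sum(good_str(i) for i in lst_lst)
-- ===== SOURCE B (Python) =====
-- def good_str(lst: list[int]) -> int:
--     return sum(min(x, y) for x, y in zip(lst, lst[1:]))
-- ===== Notes on version B (the rewrite author's own statement) =====
-- stated objective: faster
-- what changed: Replaced the recursive min-subtract-and-split scheme by the closed form: the answer is the sum of min(a[i], a[i+1]) over adjacent pairs, computed in one linear pass.
import Mathlib
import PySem

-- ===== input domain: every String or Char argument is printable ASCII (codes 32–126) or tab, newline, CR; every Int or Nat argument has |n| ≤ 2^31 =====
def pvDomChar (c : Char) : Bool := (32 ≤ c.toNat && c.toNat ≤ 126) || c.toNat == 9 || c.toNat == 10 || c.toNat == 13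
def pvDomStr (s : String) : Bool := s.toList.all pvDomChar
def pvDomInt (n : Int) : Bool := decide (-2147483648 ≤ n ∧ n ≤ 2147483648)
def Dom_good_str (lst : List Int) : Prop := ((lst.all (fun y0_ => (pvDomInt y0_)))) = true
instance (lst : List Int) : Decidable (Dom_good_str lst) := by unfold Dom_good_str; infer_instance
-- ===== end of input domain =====

-- B replaces A's O(n^2) recursive min-subtract-and-split scheme by a one-pass
-- sum of min(a[i], a[i+1]) over adjacent pairs (objective: faster, asymptotic).

-- ===== PORT A =====
-- the body of A's segmentation loop (state = (lst_lst, tmp_lst))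
def gsStep (st : List (List Int) × List Int) (i : Int) : List (List Int) × List Int :=
  if i > 0 then (st.1, st.2 ++ [i])
  else if 0 < st.2.length then (st.1 ++ [st.2], ([] : List Int))
  else st

-- the trailing 'if 0 < len(tmp_lst): lst_lst.append(tmp_lst)'
def gsFinal (st : List (List Int) × List Int) : List (List Int) :=
  if 0 < st.2.length then st.1 ++ [st.2] else st.1

-- A's recursion, made total with a fuel guard (fuel = length + 1 always suffices)
def gsA : Nat → List Int → Int
  | 0, _ => 0
  | fuel+1, lst =>
    if lst.length < 2 then 0
    else
      match PySem.List.min? lst (fun x => x) with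
      | none => 0   -- unreachable: lst has length ≥ 2 here
      | some tmp =>
        let lst1 := lst.map (fun i => i - tmp)
        let segs := gsFinal (lst1.foldl gsStep ([], []))
        tmp * ((lst.length : Int) - 1) + (segs.map (gsA fuel)).sum

def good_str (lst : List Int) : Int := gsA (lst.length + 1) lst

-- ===== PORT B =====
-- sum(min(x, y) for x, y in zip(lst, lst[1:]))
def good_str_alt (lst : List Int) : Int :=
  ((lst.zip (PySem.List.slice lst (some 1) none)).map (fun p => min p.1 p.2)).sum

-- ===== PRECONDITION & SPEC =====
def Spec_good_str (lst : List Int) (out : Int) : Prop := out = good_str_alt lst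
instance (lst : List Int) (out : Int) : Decidable (Spec_good_str lst out) := by unfold Spec_good_str; infer_instance

-- ===== CLAIM (what is proved, stated in full; the proofs are below) =====
def Claim_equal_good_str : Prop := ∀ (lst : List Int), Dom_good_str lst → Spec_good_str lst (good_str lst)

-- ===== LEMMAS AND PROOFS =====

-- sum of adjacent-pair minima, in recursive form (proof vehicle)
def pairsum : List Int → Int
  | a :: b :: t => min a b + pairsum (b :: t)
  | _ => 0

theorem alt_eq_pairsum (lst : List Int) : good_str_alt lst = pairsum lst := by
  unfold good_str_alt
  rw [PySem.List.slice_from_one]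
  induction lst with
  | nil => simp [pairsum]
  | cons a t ih =>
    cases t with
    | nil => simp [pairsum]
    | cons b u =>
      simp only [List.tail_cons, List.zip_cons_cons, List.map_cons, List.sum_cons, pairsum]
      have := ih
      simp only [List.tail_cons] at this
      omega

theorem pairsum_zero_cons (xs : List Int) (h : ∀ y ∈ xs, 0 ≤ y) :
    pairsum (0 :: xs) = pairsum xs := by
  cases xs with
  | nil => rfl
  | cons b t =>
    have hb : 0 ≤ b := h b (by simp)
    simp only [pairsum]
    have : min (0:Int) b = 0 := by omega
    rw [this]; ring

theorem pairsum_append_zero (cur : List Int) (hc : ∀ c ∈ cur, 0 < c) (xs : List Int) :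
    pairsum (cur ++ 0 :: xs) = pairsum cur + pairsum (0 :: xs) := by
  induction cur with
  | nil =>
    rw [List.nil_append, show pairsum [] = 0 from rfl]
    ring
  | cons c cs ih =>
    have hc0 : 0 < c := hc c (by simp)
    cases cs with
    | nil =>
      rw [List.cons_append, List.nil_append,
          show pairsum (c :: 0 :: xs) = min c 0 + pairsum (0 :: xs) from rfl,
          show pairsum [c] = 0 from rfl]
      omega
    | cons c2 t =>
      have h' : ∀ x ∈ c2 :: t, 0 < x := fun x hx => hc x (by simp [hx])
      rw [List.cons_append,
          show pairsum (c :: (c2 :: t ++ 0 :: xs)) = min c c2 + pairsum (c2 :: t ++ 0 :: xs) from rfl,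
          ih h',
          show pairsum (c :: c2 :: t) = min c c2 + pairsum (c2 :: t) from rfl]
      ring

theorem pairsum_map_sub (m : Int) : ∀ (xs : List Int) (a : Int),
    pairsum ((a :: xs).map (fun i => i - m)) = pairsum (a :: xs) - m * xs.length := by
  intro xs
  induction xs with
  | nil => intro a; simp [pairsum]
  | cons b t ih =>
    intro a
    simp only [List.map_cons, pairsum, List.length_cons] at *
    have := ih b
    have hmin : min (a - m) (b - m) = min a b - m := by omega
    rw [hmin]
    push_cast
    rw [this]
    ring

-- the segmentation loop's sum invariant
theorem seg_sum : ∀ (xs : List Int) (acc : List (List Int)) (cur : List Int),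
    (∀ x ∈ xs, 0 ≤ x) → (∀ c ∈ cur, 0 < c) →
    ((gsFinal (xs.foldl gsStep (acc, cur))).map pairsum).sum
      = (acc.map pairsum).sum + pairsum (cur ++ xs) := by
  intro xs
  induction xs with
  | nil =>
    intro acc cur _ _
    simp only [List.foldl_nil, gsFinal, List.append_nil]
    split
    · next h => simp
    · next h =>
      have : cur = [] := by
        cases cur with
        | nil => rfl
        | cons a t => simp at h
      subst this
      rw [show pairsum [] = 0 from rfl]
      ring
  | cons x xs ih =>
    intro acc cur hnn hc
    have hx : 0 ≤ x := hnn x (by simp)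
    have hnn' : ∀ y ∈ xs, 0 ≤ y := fun y hy => hnn y (by simp [hy])
    simp only [List.foldl_cons, gsStep]
    by_cases hpos : x > 0
    · have hc' : ∀ c ∈ cur ++ [x], 0 < c := by
        intro c hcm
        rcases List.mem_append.1 hcm with h | h
        · exact hc c h
        · simp at h; omega
      rw [if_pos hpos, ih acc (cur ++ [x]) hnn' hc', List.append_assoc, List.singleton_append]
    · have hx0 : x = 0 := by omega
      rw [if_neg hpos]
      by_cases hcur : 0 < cur.length
      · rw [if_pos hcur, ih (acc ++ [cur]) [] hnn' (by simp)]
        subst hx0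
        rw [List.nil_append, List.map_append, List.sum_append,
            pairsum_append_zero cur hc xs, pairsum_zero_cons xs hnn']
        simp
        ring
      · have hce : cur = [] := by
          cases cur with
          | nil => rfl
          | cons a t => simp at hcur
        rw [if_neg hcur, ih acc cur hnn' hc]
        subst hx0
        subst hce
        rw [List.nil_append, List.nil_append, pairsum_zero_cons xs hnn']

-- every produced segment is at most as long as the number of positive entries
theorem seg_len : ∀ (xs : List Int) (acc : List (List Int)) (cur : List Int)
    (seg : List Int), seg ∈ gsFinal (xs.foldl gsStep (acc, cur)) →
    seg ∈ acc ∨ seg.length ≤ cur.length + xs.countP (fun i => decide (i > 0)) := by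
  intro xs
  induction xs with
  | nil =>
    intro acc cur seg hmem
    simp only [List.foldl_nil, gsFinal] at hmem
    split at hmem
    · rcases List.mem_append.1 hmem with h | h
      · exact Or.inl h
      · simp at h; right; subst h; simp
    · exact Or.inl hmem
  | cons x xs ih =>
    intro acc cur seg hmem
    simp only [List.foldl_cons, gsStep] at hmem
    by_cases hpos : x > 0
    · rw [if_pos hpos] at hmem
      rcases ih acc (cur ++ [x]) seg hmem with h | h
      · exact Or.inl h
      · right
        simp only [List.length_append, List.length_cons] at h ⊢
        rw [List.countP_cons]
        simp [hpos] at *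
        omega
    · rw [if_neg hpos] at hmem
      by_cases hcur : 0 < cur.length
      · rw [if_pos hcur] at hmem
        rcases ih (acc ++ [cur]) [] seg hmem with h | h
        · rcases List.mem_append.1 h with h' | h'
          · exact Or.inl h'
          · simp at h'; right; subst h'
            rw [List.countP_cons]
            simp
        · right
          rw [List.countP_cons]
          simp at h ⊢
          omega
      · rw [if_neg hcur] at hmem
        rcases ih acc cur seg hmem with h | h
        · exact Or.inl h
        · right
          rw [List.countP_cons]
          omega

theorem countP_lt_of_mem_not {p : Int → Bool} {xs : List Int} {a : Int}
    (ha : a ∈ xs) (hpa : ¬ p a) : xs.countP p < xs.length := by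
  have hle : xs.countP p ≤ xs.length := List.countP_le_length
  rcases Nat.lt_or_ge (xs.countP p) xs.length with h | h
  · exact h
  · exfalso
    have heq : xs.countP p = xs.length := le_antisymm hle h
    have := List.countP_eq_length.1 heq a ha
    exact hpa this

theorem pairsum_short (lst : List Int) (h : lst.length < 2) : pairsum lst = 0 := by
  match lst, h with
  | [], _ => rfl
  | [a], _ => rfl

theorem gsA_eq : ∀ (fuel : Nat) (lst : List Int), lst.length < fuel → gsA fuel lst = pairsum lst := by
  intro fuel
  induction fuel with
  | zero => intro lst h; omega
  | succ f ih =>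
    intro lst hlen
    by_cases h2 : lst.length < 2
    · rw [pairsum_short lst h2]
      simp [gsA, h2]
    · have hne : lst ≠ [] := by intro h; subst h; simp at h2
      obtain ⟨m, hm⟩ : ∃ m, PySem.List.min? lst (fun x => x) = some m := by
        cases hmin : PySem.List.min? lst (fun x => x) with
        | none => exact absurd ((PySem.List.min?_eq_none_iff lst (fun x => x)).1 hmin) hne
        | some m => exact ⟨m, rfl⟩
      have hmem : m ∈ lst := PySem.List.min?_mem hm
      have hmin : ∀ y ∈ lst, m ≤ y := fun y hy => PySem.List.min?_isMin hm y hy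
      simp only [gsA, if_neg h2, hm]
      set lst1 := lst.map (fun i => i - m) with hlst1
      have hnn : ∀ x ∈ lst1, 0 ≤ x := by
        intro x hx
        rw [hlst1] at hx
        rcases List.mem_map.1 hx with ⟨y, hy, rfl⟩
        have := hmin y hy
        omega
      set segs := gsFinal (lst1.foldl gsStep ([], [])) with hsegs
      -- segment sums
      have hsum : (segs.map pairsum).sum = pairsum lst1 := by
        rw [hsegs, seg_sum lst1 [] [] hnn (by simp)]
        simp
      -- segment lengths
      have hlen' : ∀ seg ∈ segs, seg.length < lst.length := by
        intro seg hseg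
        rcases seg_len lst1 [] [] seg (hsegs ▸ hseg) with h | h
        · simp at h
        · have h0 : (0:Int) ∈ lst1 := by
            rw [hlst1]
            exact List.mem_map.2 ⟨m, hmem, by ring⟩
          have hcnt : lst1.countP (fun i => decide (i > 0)) < lst1.length :=
            countP_lt_of_mem_not h0 (by simp)
          have hll : lst1.length = lst.length := by rw [hlst1]; simp
          simp only [List.length_nil, Nat.zero_add] at h
          omega
      have hmap : segs.map (gsA f) = segs.map pairsum := by
        apply List.map_congr_left
        intro seg hseg
        exact ih seg (by have := hlen' seg hseg; omega)
      rw [hmap, hsum]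
      -- closed-form algebra
      obtain ⟨a, xs, rfl⟩ : ∃ a xs, lst = a :: xs := by
        cases lst with
        | nil => exact absurd rfl hne
        | cons a xs => exact ⟨a, xs, rfl⟩
      rw [hlst1, pairsum_map_sub m xs a]
      simp only [List.length_cons]
      push_cast
      ring

-- ===== VERDICT (by name: the statement is the Claim_ definition above) =====
theorem good_str_spec : Claim_equal_good_str := by
  intro lst _
  unfold Spec_good_str
  rw [alt_eq_pairsum]
  exact gsA_eq (lst.length + 1) lst (by omega)
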